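-- pv_equiv track=rewrite | github.com/GDNDZZK/FingertipMagicMouse | app.py | calculate_simplified_ratio
-- ===== SOURCE A (Python) =====
-- def calculate_simplified_ratio(num1, num2):
--     """
--     计算两个数字的简化比例。
--
--     Args:
--     num1 (int): 第一个数字
--     num2 (int): 第二个数字
--
--     Return:
--     ratio_numerator (int): 简化比例的分子
--     ratio_denominator (int): 简化比例的分母
--     """
--     def gcd(a, b):
--         """
--         计算最大公约数。
--
--         Args:
--         a (int): 第一个整数
--         b (int): 第二个整数
--
--         Return:
--         int: 两个整数的最大公约数。
--         """
--         while b: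
--             a, b = b, a % b
--         return a
--
--     common_divisor = gcd(num1, num2)
--     ratio_numerator = num1 // common_divisor
--     ratio_denominator = num2 // common_divisor
--
--     return ratio_numerator, ratio_denominator
-- ===== SOURCE B (Python) =====
-- def _gcd_abs(x, y):
--     """gcd of two non-negative ints, recursive Euclid."""
--     return x if y == 0 else _gcd_abs(y, x % y)
--
--
-- def calculate_simplified_ratio(num1, num2):
--     g = _gcd_abs(abs(num1), abs(num2))
--     # A's loop gcd carries the sign of num2 (or of num1 when num2 == 0).
--     if num2 < 0 or (num2 == 0 and num1 < 0):
--         g = -g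
--     return num1 // g, num2 // g
-- ===== Notes on version B (the rewrite author's own statement) =====
-- stated objective: alternative
-- what changed: Replaces the in-loop signed Euclid (while b: a,b = b, a%b with Python's floor-mod) by a recursive Euclid on absolute values plus an explicit sign adjustment taken from num2 (or num1 when num2 == 0).
import Mathlib
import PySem

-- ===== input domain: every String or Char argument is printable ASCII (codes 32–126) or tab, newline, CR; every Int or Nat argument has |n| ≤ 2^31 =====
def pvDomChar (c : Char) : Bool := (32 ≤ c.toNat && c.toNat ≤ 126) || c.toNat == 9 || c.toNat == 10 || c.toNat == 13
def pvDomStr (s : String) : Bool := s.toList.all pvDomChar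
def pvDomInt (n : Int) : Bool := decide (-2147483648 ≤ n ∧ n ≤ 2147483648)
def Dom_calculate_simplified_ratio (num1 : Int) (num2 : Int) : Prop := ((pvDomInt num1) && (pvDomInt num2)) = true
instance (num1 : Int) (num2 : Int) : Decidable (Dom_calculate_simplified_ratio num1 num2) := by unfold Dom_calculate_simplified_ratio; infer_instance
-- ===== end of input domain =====

-- B replaces A's signed in-loop Euclid by a recursive Euclid on absolute values plus an
-- explicit sign adjustment (alternative decomposition; same asymptotic cost).

-- ===== PORT A =====
-- while b: a, b = b, a % b  (Python floor-mod), then return a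
def pvGcdLoop (a b : Int) : Int :=
  if _hb : b = 0 then a else pvGcdLoop b (PySem.Int.mod a b)
termination_by b.natAbs
decreasing_by
  rcases lt_trichotomy b 0 with h1 | h1 | h1
  · have := PySem.Int.mod_neg_bounds (a := a) h1; omega
  · exact absurd h1 _hb
  · have h2 := PySem.Int.mod_nonneg (a := a) h1
    have h3 := PySem.Int.mod_lt (a := a) h1
    omega

def calculate_simplified_ratio (num1 : Int) (num2 : Int) : Int × Int :=
  let common_divisor := pvGcdLoop num1 num2
  let ratio_numerator := PySem.Int.floordiv num1 common_divisor
  let ratio_denominator := PySem.Int.floordiv num2 common_divisor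
  (ratio_numerator, ratio_denominator)

-- ===== PORT B =====
-- return x if y == 0 else _gcd_abs(y, x % y)   (non-negative ints)
def pvGcdAbs (x y : Nat) : Nat :=
  if _hy : y = 0 then x else pvGcdAbs y (x % y)
termination_by y
decreasing_by exact Nat.mod_lt x (Nat.pos_of_ne_zero _hy)

def calculate_simplified_ratio_alt (num1 : Int) (num2 : Int) : Int × Int :=
  let g0 : Int := (pvGcdAbs num1.natAbs num2.natAbs : Nat)
  let g : Int := if num2 < 0 ∨ (num2 = 0 ∧ num1 < 0) then -g0 else g0
  (PySem.Int.floordiv num1 g, PySem.Int.floordiv num2 g)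

-- ===== PRECONDITION & SPEC =====
-- Pre_ excludes only num1 = num2 = 0, where both Pythons raise ZeroDivisionError (gcd is 0).
def Pre_calculate_simplified_ratio (num1 : Int) (num2 : Int) : Prop := ¬ (num1 = 0 ∧ num2 = 0)
instance (num1 : Int) (num2 : Int) : Decidable (Pre_calculate_simplified_ratio num1 num2) := by unfold Pre_calculate_simplified_ratio; infer_instance
def pvWitness_calculate_simplified_ratio : Int × Int := (6, -4)

def Spec_calculate_simplified_ratio (num1 : Int) (num2 : Int) (out : Int × Int) : Prop := out = calculate_simplified_ratio_alt num1 num2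
instance (num1 : Int) (num2 : Int) (out : Int × Int) : Decidable (Spec_calculate_simplified_ratio num1 num2 out) := by unfold Spec_calculate_simplified_ratio; infer_instance

-- ===== CLAIM (what is proved, stated in full; the proofs are below) =====
def Claim_equal_calculate_simplified_ratio : Prop := ∀ (num1 : Int) (num2 : Int), Dom_calculate_simplified_ratio num1 num2 → Pre_calculate_simplified_ratio num1 num2 → Spec_calculate_simplified_ratio num1 num2 (calculate_simplified_ratio num1 num2)

-- ===== LEMMAS AND PROOFS =====

theorem pvGcdAbs_eq_gcd (x y : Nat) : pvGcdAbs x y = Nat.gcd x y := by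
  induction x, y using pvGcdAbs.induct with
  | case1 x => simp [pvGcdAbs]
  | case2 x y hy ih =>
      rw [pvGcdAbs, dif_neg hy, ih, Nat.gcd_comm y (x % y), ← Nat.gcd_rec, Nat.gcd_comm]

theorem pvGcdLoop_eq (a b : Int) :
    pvGcdLoop a b =
      if b < 0 ∨ (b = 0 ∧ a < 0) then -(Int.gcd a b : Int) else (Int.gcd a b : Int) := by
  induction a, b using pvGcdLoop.induct with
  | case1 a =>
      have hloop : pvGcdLoop a 0 = a := by simp [pvGcdLoop]
      rw [hloop]
      rcases lt_or_ge a 0 with h | h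
      · rw [if_pos (Or.inr ⟨rfl, h⟩)]
        simp only [Int.gcd, Int.natAbs_zero, Nat.gcd_zero_right]
        omega
      · rw [if_neg (by rintro (hc | ⟨-, hc⟩) <;> omega)]
        simp only [Int.gcd, Int.natAbs_zero, Nat.gcd_zero_right]
        omega
  | case2 a b hb ih =>
      have hmod : PySem.Int.mod a b = a - PySem.Int.floordiv a b * b := by
        have := PySem.Int.floordiv_mul_add_mod a b; omega
      have hgcd : Int.gcd b (PySem.Int.mod a b) = Int.gcd a b := by
        rw [hmod, Int.gcd_sub_mul_right_right, Int.gcd_comm]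
      rw [pvGcdLoop, dif_neg hb, ih, hgcd]
      rcases lt_trichotomy b 0 with h1 | h1 | h1
      · have h2 := PySem.Int.mod_neg_bounds (a := a) h1
        rw [if_pos (by omega), if_pos (by omega)]
      · exact absurd h1 hb
      · have h2 := PySem.Int.mod_nonneg (a := a) h1
        rw [if_neg (by omega), if_neg (by omega)]

-- ===== VERDICT (by name: the statement is the Claim_ definition above) =====
theorem calculate_simplified_ratio_spec : Claim_equal_calculate_simplified_ratio := by
  intro num1 num2 _ _
  unfold Spec_calculate_simplified_ratio calculate_simplified_ratio calculate_simplified_ratio_alt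
  simp only [pvGcdLoop_eq, pvGcdAbs_eq_gcd, Int.gcd]
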